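-- pv_equiv track=rewrite | github.com/xsdier/TestWeb | TestWeb/activity.py | listlist
-- ===== SOURCE A (Python) =====
-- def tolist(a):
--     b=[]
--     c=''
--     n=0
--     for aa in a:
--         n=n+1
--         if aa==',':
--             b.append(int(c))
--             c=''
--             #pass
--         elif n==len(a):
--             c=c+aa
--             b.append(int(c))
--             c=''
--         else:
--             c=c+aa
--     return b
--
-- def listlist(a):
--     c=''
--     n=0
--     b=[]
--     for aa in a:
--         n=n+1
--         if aa=='[':
--             c=''
--         elif aa==']':
--             c=tolist(c)
--             b.append(c)
--             c=''
--         elif aa==',' and a[n-1]!=']':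
--             c=c+aa
--         else:
--             c=c+aa
--     return b
-- ===== SOURCE B (Python) =====
-- def tolist(a):
--     if a == '':
--         return []
--     toks = a.split(',')
--     if toks[-1] == '':
--         toks.pop()
--     return [int(t) for t in toks]
--
-- def listlist(a):
--     return [tolist(f.split('[')[-1]) for f in a.split(']')[:-1]]
-- ===== Notes on version B (the rewrite author's own statement) =====
-- stated objective: simpler
-- what changed: Replaces the character-by-character state machine (with its dead comma/lookback test and incremental string accumulation) by split-based parsing: listlist is a one-line comprehension over the fragments before each closing bracket, taking each fragment's part after its last opening bracket, and tolist splits on commas and drops a trailing empty token.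
import Mathlib
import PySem

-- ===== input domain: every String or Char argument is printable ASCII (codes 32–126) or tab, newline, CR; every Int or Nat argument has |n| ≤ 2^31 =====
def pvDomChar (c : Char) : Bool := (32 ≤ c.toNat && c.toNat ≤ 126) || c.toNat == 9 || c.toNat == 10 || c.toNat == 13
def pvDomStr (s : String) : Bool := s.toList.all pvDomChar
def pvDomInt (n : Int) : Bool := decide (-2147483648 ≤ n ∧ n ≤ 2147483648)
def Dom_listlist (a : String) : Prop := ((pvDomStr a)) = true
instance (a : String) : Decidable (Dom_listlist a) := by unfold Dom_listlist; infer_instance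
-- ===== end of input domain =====

-- B replaces A's character-by-character state machine with str.split-based parsing
-- (objective: simpler). Equality of the two ports holds on all of Dom; Pre_ marks the
-- inputs where the Python A returns at all (every flushed token parses as an int).

-- int(c); the ValueError case (ofChars? = none) is excluded by Pre_listlist
def pvIntOf (cs : List Char) : Int := (PySem.Int.ofChars? cs).getD 0

-- ===== PORT A =====
-- strings are ported on .toList throughout, as PYSEM.md directs
def tolistA (cs : List Char) : List Int :=
  (cs.foldl (fun (st : List Int × List Char × Nat) aa =>
      let n := st.2.2 + 1
      if aa = ',' then (st.1 ++ [pvIntOf st.2.1], [], n)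
      else if n = cs.length then (st.1 ++ [pvIntOf (st.2.1 ++ [aa])], [], n)
      else (st.1, st.2.1 ++ [aa], n)) ([], [], 0)).1

def listlist (a : String) : List (List Int) :=
  (a.toList.foldl (fun (st : List (List Int) × List Char × Nat) aa =>
      let n := st.2.2 + 1
      if aa = '[' then (st.1, [], n)
      else if aa = ']' then (st.1 ++ [tolistA st.2.1], [], n)
      else if aa = ',' ∧ PySem.List.pyGet? a.toList ((n : Int) - 1) ≠ some ']' then
        (st.1, st.2.1 ++ [aa], n)
      else (st.1, st.2.1 ++ [aa], n)) ([], [], 0)).1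

-- ===== PORT B =====
def tolistB (cs : List Char) : List Int :=
  if cs = [] then []
  else
    let ts := PySem.Chars.splitOn cs [',']
    let ts := if PySem.List.pyGet? ts (-1) = some [] then ts.dropLast else ts
    ts.map pvIntOf

def listlist_alt (a : String) : List (List Int) :=
  ((PySem.Chars.splitOn a.toList [']']).dropLast).map
    (fun f => tolistB (PySem.List.pyGetD (PySem.Chars.splitOn f ['[']) (-1) []))

-- ===== PRECONDITION & SPEC =====
-- helper for Pre_ only (independent of both ports): the tokens A will feed to int()
def pvFragTokens (f : List Char) : List (List Char) :=
  let t := (PySem.Chars.splitOn f ['[']).getLastD []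
  if t = [] then []
  else
    let ts := PySem.Chars.splitOn t [',']
    if ts.getLastD [' '] = [] then ts.dropLast else ts

-- Pre_ excludes exactly the inputs on which the Python A raises ValueError:
-- some token of a flushed bracket group does not parse with int().
def Pre_listlist (a : String) : Prop :=
  ∀ f ∈ (PySem.Chars.splitOn a.toList [']']).dropLast,
    ∀ t ∈ pvFragTokens f, (PySem.Int.ofChars? t).isSome = true
instance (a : String) : Decidable (Pre_listlist a) := by unfold Pre_listlist; infer_instance

def pvWitness_listlist : String := "[1,2],[3]"

def Spec_listlist (a : String) (out : List (List Int)) : Prop := out = listlist_alt a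
instance (a : String) (out : List (List Int)) : Decidable (Spec_listlist a out) := by unfold Spec_listlist; infer_instance

-- ===== CLAIM (what is proved, stated in full; the proofs are below) =====
def Claim_equal_listlist : Prop := ∀ (a : String), Dom_listlist a → Pre_listlist a → Spec_listlist a (listlist a)

-- ===== LEMMAS AND PROOFS =====

-- clean single-char split, the proof-side view of PySem.Chars.splitOn
def sp (sep : Char) : List Char → List (List Char)
  | [] => [[]]
  | c :: r => if c = sep then [] :: sp sep r else (sp sep r).modifyHead (c :: ·)

theorem mh_id {α : Type} (l : List α) : l.modifyHead (fun x => x) = l := by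
  cases l <;> simp

theorem mh_comp {α : Type} (f g : α → α) (l : List α) :
    (l.modifyHead g).modifyHead f = l.modifyHead (fun x => f (g x)) := by
  cases l <;> simp

theorem sp_ne_nil (sep : Char) (l : List Char) : sp sep l ≠ [] := by
  induction l with
  | nil => simp [sp]
  | cons c r ih =>
    simp only [sp]
    split
    · simp
    · cases h : sp sep r with
      | nil => exact absurd h ih
      | cons a t => simp [List.modifyHead]

theorem gl_cons (a : List Char) (l : List (List Char)) (d : List Char) (h : l ≠ []) :
    (a :: l).getLastD d = l.getLastD d := by
  rcases hm : l.getLast? with _ | x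
  · exact absurd (List.getLast?_eq_none_iff.mp hm) h
  · simp [List.getLastD_eq_getLast?, List.getLast?_cons, hm]

theorem gl_append (l m : List (List Char)) (d : List Char) (h : m ≠ []) :
    (l ++ m).getLastD d = m.getLastD d := by
  rcases hm : m.getLast? with _ | x
  · exact absurd (List.getLast?_eq_none_iff.mp hm) h
  · simp [List.getLastD_eq_getLast?, List.getLast?_append, hm]

theorem gl_getLast (l : List (List Char)) (h : l ≠ []) (d : List Char) :
    l.getLast h = l.getLastD d := by
  rw [List.getLastD_eq_getLast?, List.getLast?_eq_some_getLast h]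
  rfl

theorem go_eq (sep : Char) (fuel : Nat) : ∀ (l cur : List Char) (acc : List (List Char)),
    l.length ≤ fuel →
    PySem.Chars.splitOn.go [sep] fuel l cur acc =
      acc.reverse ++ ((sp sep l).modifyHead (cur.reverse ++ ·)) := by
  induction fuel with
  | zero =>
    intro l cur acc h
    have hl : l = [] := List.length_eq_zero_iff.mp (Nat.le_zero.mp h)
    subst hl
    show ((cur.reverse ++ []) :: acc).reverse = _
    simp [sp]
  | succ fuel ih =>
    intro l cur acc h
    cases l with
    | nil =>
      show (cur.reverse :: acc).reverse = _
      simp [sp]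
    | cons c rest =>
      show (if [sep].isPrefixOf (c :: rest) then
              PySem.Chars.splitOn.go [sep] fuel ((c :: rest).drop 1) [] (cur.reverse :: acc)
            else PySem.Chars.splitOn.go [sep] fuel rest (c :: cur) acc) = _
      have hpre : [sep].isPrefixOf (c :: rest) = (sep == c) := by simp [List.isPrefixOf]
      rw [hpre]
      have hrest : rest.length ≤ fuel := by simpa using h
      by_cases hc : c = sep
      · subst hc
        rw [if_pos (by simp)]
        have hd : List.drop 1 (c :: rest) = rest := rfl
        rw [hd, ih rest [] (cur.reverse :: acc) hrest]
        have hsp : sp c (c :: rest) = [] :: sp c rest := by simp [sp]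
        rw [hsp]
        have hmh2 : (([] : List Char) :: sp c rest).modifyHead (fun x => cur.reverse ++ x) =
            (cur.reverse ++ []) :: sp c rest := by simp [List.modifyHead]
        rw [hmh2]
        simp only [List.reverse_cons, List.reverse_nil, List.nil_append, List.append_nil]
        rw [mh_id]
        simp
      · rw [if_neg (by simp only [beq_iff_eq]; exact fun h' => hc h'.symm)]
        rw [ih rest (c :: cur) acc hrest]
        simp only [sp, if_neg hc, List.reverse_cons]
        rw [mh_comp]
        have : (fun x => cur.reverse ++ [c] ++ x) = (fun x : List Char => cur.reverse ++ (c :: x)) := by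
          funext x; simp
        rw [this]

theorem splitOn_eq_sp (sep : Char) (l : List Char) :
    PySem.Chars.splitOn l [sep] = sp sep l := by
  show PySem.Chars.splitOn.go [sep] (l.length + 1) l [] [] = sp sep l
  rw [go_eq sep (l.length + 1) l [] [] (by omega)]
  simp only [List.reverse_nil, List.nil_append]
  exact mh_id _

theorem sp_of_not_mem {sep : Char} : ∀ {l : List Char}, sep ∉ l → sp sep l = [l] := by
  intro l
  induction l with
  | nil => intro _; rfl
  | cons c r ih =>
    intro h
    have hc : ¬ c = sep := fun he => h (by simp [he])
    have hr : sep ∉ r := fun hm => h (by simp [hm])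
    simp [sp, hc, ih hr]

theorem sp_append_sep (sep : Char) : ∀ (u v : List Char),
    ∃ w, sp sep (u ++ sep :: v) = w ++ sp sep v ∧ w ≠ [] := by
  intro u v
  induction u with
  | nil => exact ⟨[[]], by simp [sp], by simp⟩
  | cons c u' ih =>
    obtain ⟨w, hw, hne⟩ := ih
    by_cases hc : c = sep
    · exact ⟨[] :: w, by simp [sp, hc, hw], by simp⟩
    · rcases w with _ | ⟨a, w'⟩
      · exact absurd rfl hne
      · refine ⟨(c :: a) :: w', ?_, by simp⟩
        simp [sp, hc, hw, List.modifyHead]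

theorem getLastD_sp_append_sep (sep : Char) (u v : List Char) (d : List Char) :
    (sp sep (u ++ sep :: v)).getLastD d = (sp sep v).getLastD d := by
  obtain ⟨w, hw, _⟩ := sp_append_sep sep u v
  rw [hw, gl_append _ _ _ (sp_ne_nil sep v)]

-- trailing-empty-token drop, shared shape of tolistB and the tl characterisation
def dropTrail (ts : List (List Char)) : List (List Char) :=
  if ts.getLastD [' '] = [] then ts.dropLast else ts

-- clean recursion equivalent to tolistA's fold
def tl (b : List Int) (c : List Char) : List Char → List Int
  | [] => b
  | aa :: l =>
      if aa = ',' then tl (b ++ [pvIntOf c]) [] l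
      else if l = [] then b ++ [pvIntOf (c ++ [aa])]
      else tl b (c ++ [aa]) l

theorem tolistA_eq_tl (cs : List Char) : tolistA cs = tl [] [] cs := by
  have key : ∀ (l : List Char) (b : List Int) (c : List Char) (n : Nat),
      n + l.length = cs.length →
      (l.foldl (fun (st : List Int × List Char × Nat) aa =>
          let n := st.2.2 + 1
          if aa = ',' then (st.1 ++ [pvIntOf st.2.1], [], n)
          else if n = cs.length then (st.1 ++ [pvIntOf (st.2.1 ++ [aa])], [], n)
          else (st.1, st.2.1 ++ [aa], n)) (b, c, n)).1 = tl b c l := by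
    intro l
    induction l with
    | nil => intros; rfl
    | cons aa l ih =>
      intro b c n h
      simp only [List.foldl_cons]
      by_cases h1 : aa = ','
      · simp only [h1, tl]
        exact ih _ _ _ (by simp at h ⊢; omega)
      · by_cases h2 : n + 1 = cs.length
        · have hl : l = [] := by
            have := h; simp at this; exact List.length_eq_zero_iff.mp (by omega)
          subst hl
          simp [tl, h1, h2]
        · have hl : l ≠ [] := by
            intro he; subst he; simp at h; omega
          simp only [tl, if_neg h1, if_neg hl, if_neg h2]
          exact ih _ _ _ (by simp at h ⊢; omega)
  unfold tolistA
  exact key cs [] [] 0 (by simp)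

theorem tl_spec : ∀ (l : List Char), l ≠ [] → ∀ (c : List Char) (b : List Int),
    tl b c l = b ++ (dropTrail ((sp ',' l).modifyHead (c ++ ·))).map pvIntOf := by
  intro l
  induction l with
  | nil => intro h; exact absurd rfl h
  | cons aa l ih =>
    intro _ c b
    by_cases h1 : aa = ','
    · subst h1
      rcases hl : l with _ | ⟨x, xs⟩
      · simp [tl, sp, dropTrail, List.modifyHead]
      · rw [← hl]
        have hlne : l ≠ [] := by simp [hl]
        have step : tl b c (',' :: l) = tl (b ++ [pvIntOf c]) [] l := by simp [tl]
        rw [step, ih hlne [] (b ++ [pvIntOf c])]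
        have hmh : (sp ',' l).modifyHead (fun x => [] ++ x) = sp ',' l := by
          simp only [List.nil_append]; exact mh_id _
        rw [hmh]
        have hsp : sp ',' (',' :: l) = [] :: sp ',' l := by simp [sp]
        rw [hsp]
        have hmh2 : (([] : List Char) :: sp ',' l).modifyHead (c ++ ·) = c :: sp ',' l := by
          simp [List.modifyHead]
        rw [hmh2]
        unfold dropTrail
        rw [gl_cons c _ _ (sp_ne_nil ',' l)]
        split
        · rw [List.dropLast_cons_of_ne_nil (sp_ne_nil ',' l)]
          simp
        · simp
    · rcases hl : l with _ | ⟨x, xs⟩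
      · have hsp : sp ',' [aa] = [[aa]] := by simp [sp, h1, List.modifyHead]
        simp [tl, h1, hsp, dropTrail, List.modifyHead]
      · rw [← hl]
        have hlne : l ≠ [] := by simp [hl]
        have step : tl b c (aa :: l) = tl b (c ++ [aa]) l := by simp [tl, h1, hlne]
        rw [step, ih hlne (c ++ [aa]) b]
        have hsp : sp ',' (aa :: l) = (sp ',' l).modifyHead (aa :: ·) := by simp [sp, h1]
        rw [hsp, mh_comp]
        have : (fun x : List Char => c ++ (aa :: x)) = (fun x : List Char => (c ++ [aa]) ++ x) := by
          funext x; simp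
        rw [this]

theorem getLast?_some_iff (ts : List (List Char)) (h : ts ≠ []) :
    (ts.getLast? = some [] ↔ ts.getLastD [' '] = []) := by
  rcases hm : ts.getLast? with _ | x
  · exact absurd (List.getLast?_eq_none_iff.mp hm) h
  · simp [List.getLastD_eq_getLast?, hm]

theorem tolist_eq (cs : List Char) : tolistA cs = tolistB cs := by
  rcases hcs : cs with _ | ⟨x, xs⟩
  · rfl
  · rw [← hcs]
    have hne : cs ≠ [] := by simp [hcs]
    rw [tolistA_eq_tl, tl_spec cs hne [] []]
    have hmh : (sp ',' cs).modifyHead (fun x => [] ++ x) = sp ',' cs := by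
      simp only [List.nil_append]; exact mh_id _
    rw [hmh]
    unfold tolistB
    rw [if_neg hne]
    simp only [splitOn_eq_sp, PySem.List.pyGet?_neg_one]
    unfold dropTrail
    by_cases hlast : (sp ',' cs).getLastD [' '] = []
    · rw [if_pos hlast, if_pos ((getLast?_some_iff _ (sp_ne_nil ',' cs)).mpr hlast)]
      simp
    · rw [if_neg hlast,
          if_neg (fun hc => hlast ((getLast?_some_iff _ (sp_ne_nil ',' cs)).mp hc))]
      simp

-- clean recursion equivalent to listlist's fold
def ll (b : List (List Int)) (c : List Char) : List Char → List (List Int)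
  | [] => b
  | aa :: l =>
      if aa = '[' then ll b [] l
      else if aa = ']' then ll (b ++ [tolistA c]) [] l
      else ll b (c ++ [aa]) l

def stepL (a : String) (st : List (List Int) × List Char × Nat) (aa : Char) :
    List (List Int) × List Char × Nat :=
  let n := st.2.2 + 1
  if aa = '[' then (st.1, [], n)
  else if aa = ']' then (st.1 ++ [tolistA st.2.1], [], n)
  else if aa = ',' ∧ PySem.List.pyGet? a.toList ((n : Int) - 1) ≠ some ']' then
    (st.1, st.2.1 ++ [aa], n)
  else (st.1, st.2.1 ++ [aa], n)

theorem listlist_eq_ll (a : String) : listlist a = ll [] [] a.toList := by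
  have key : ∀ (l : List Char) (b : List (List Int)) (c : List Char) (n : Nat),
      (l.foldl (stepL a) (b, c, n)).1 = ll b c l := by
    intro l
    induction l with
    | nil => intros; rfl
    | cons aa l ih =>
      intro b c n
      rw [List.foldl_cons]
      by_cases h1 : aa = '['
      · rw [show stepL a (b, c, n) aa = (b, [], n + 1) from by simp [stepL, h1]]
        simp only [ll, h1, if_pos rfl]
        exact ih _ _ _
      · by_cases h2 : aa = ']'
        · rw [show stepL a (b, c, n) aa = (b ++ [tolistA c], [], n + 1) from by
            simp [stepL, h1, h2]]
          simp only [ll, h2, if_neg (by simp : ¬(']' = '[')), if_pos rfl, if_neg h1]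
          exact ih _ _ _
        · rw [show stepL a (b, c, n) aa = (b, c ++ [aa], n + 1) from by
            simp [stepL, h1, h2, ite_self]]
          simp only [ll, if_neg h1, if_neg h2]
          exact ih _ _ _
  have hport : listlist a = (a.toList.foldl (stepL a) ([], [], 0)).1 := rfl
  rw [hport]
  exact key a.toList [] [] 0

def gseg (f : List Char) : List Int := tolistB ((sp '[' f).getLastD [])

theorem ll_spec : ∀ (l : List Char) (c : List Char) (b : List (List Int)),
    '[' ∉ c → ']' ∉ c →
    ll b c l = b ++ ((((sp ']' l).modifyHead (c ++ ·)).dropLast).map gseg) := by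
  intro l
  induction l with
  | nil => intro c b _ _; simp [ll, sp, List.modifyHead]
  | cons aa l ih =>
    intro c b h1 h2
    by_cases ha : aa = '['
    · subst ha
      have step : ll b c ('[' :: l) = ll b [] l := by simp [ll]
      rw [step, ih [] b (by simp) (by simp)]
      have hmh : (sp ']' l).modifyHead (fun x => [] ++ x) = sp ']' l := by
        simp only [List.nil_append]; exact mh_id _
      rw [hmh]
      have hsp : sp ']' ('[' :: l) = (sp ']' l).modifyHead ('[' :: ·) := by
        simp [sp]
      rw [hsp, mh_comp]
      rcases hs : sp ']' l with _ | ⟨s0, rest⟩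
      · exact absurd hs (sp_ne_nil ']' l)
      · rcases rest with _ | ⟨r, rs⟩
        · simp [List.modifyHead]
        · have hg : gseg (c ++ '[' :: s0) = gseg s0 := by
            unfold gseg
            rw [getLastD_sp_append_sep '[' c s0]
          simp only [List.modifyHead, List.dropLast_cons_of_ne_nil
              (by simp : (r :: rs : List (List Char)) ≠ []), List.map_cons, hg]
    · by_cases hb : aa = ']'
      · subst hb
        have step : ll b c (']' :: l) = ll (b ++ [tolistA c]) [] l := by simp [ll]
        rw [step, ih [] (b ++ [tolistA c]) (by simp) (by simp)]
        have hmh : (sp ']' l).modifyHead (fun x => [] ++ x) = sp ']' l := by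
          simp only [List.nil_append]; exact mh_id _
        rw [hmh]
        have hsp : sp ']' (']' :: l) = [] :: sp ']' l := by simp [sp]
        rw [hsp]
        have hmh2 : (([] : List Char) :: sp ']' l).modifyHead (c ++ ·) = c :: sp ']' l := by
          simp [List.modifyHead]
        rw [hmh2, List.dropLast_cons_of_ne_nil (sp_ne_nil ']' l)]
        have hg : gseg c = tolistA c := by
          unfold gseg
          rw [sp_of_not_mem h1]
          simp [tolist_eq]
        simp [hg]
      · have step : ll b c (aa :: l) = ll b (c ++ [aa]) l := by simp [ll, ha, hb]
        rw [step, ih (c ++ [aa]) b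
          (by simp [h1]; exact fun h => ha h.symm)
          (by simp [h2]; exact fun h => hb h.symm)]
        have hsp : sp ']' (aa :: l) = (sp ']' l).modifyHead (aa :: ·) := by simp [sp, hb]
        rw [hsp, mh_comp]
        have : (fun x : List Char => c ++ (aa :: x)) = (fun x : List Char => (c ++ [aa]) ++ x) := by
          funext x; simp
        rw [this]

theorem alt_eq (a : String) :
    listlist_alt a = ((sp ']' a.toList).dropLast).map gseg := by
  unfold listlist_alt
  rw [splitOn_eq_sp]
  congr 1
  funext f
  rw [splitOn_eq_sp, PySem.List.pyGetD_neg_one (sp '[' f) [] (sp_ne_nil '[' f),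
      gl_getLast _ (sp_ne_nil '[' f) []]
  rfl

-- ===== VERDICT (by name: the statement is the Claim_ definition above) =====
theorem listlist_spec : Claim_equal_listlist := by
  intro a _ _
  show listlist a = listlist_alt a
  rw [listlist_eq_ll, alt_eq, ll_spec a.toList [] [] (by simp) (by simp)]
  have hmh : (sp ']' a.toList).modifyHead (fun x => [] ++ x) = sp ']' a.toList := by
    simp only [List.nil_append]; exact mh_id _
  rw [hmh, List.nil_append]
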